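-- pv_equiv track=rewrite | github.com/SeanJaeger1/Algorithms | algos/graphs/reverse_adjacency_list.py | reverse_adjacency_list
-- ===== SOURCE A (Python) =====
-- def reverse_adjacency_list(adjacency_list):
--     new_adjacency_list = {}
--
--     for key in adjacency_list:
--         for edge in adjacency_list[key]:
--             if edge in new_adjacency_list:
--                 if key not in new_adjacency_list[edge]:
--                     new_adjacency_list[edge].append(key)
--             else:
--                 new_adjacency_list[edge] = [key]
--
--     return new_adjacency_list
-- ===== SOURCE B (Python) =====
-- def reverse_adjacency_list(adjacency_list):
--     # Enumerate the target nodes in order of first appearance, then compute each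
--     # target's parent list by a full scan over the source keys.
--     targets = dict.fromkeys(e for k in adjacency_list for e in adjacency_list[k])
--     return {e: [k for k in adjacency_list if e in adjacency_list[k]] for e in targets}
-- ===== Notes on version B (the rewrite author's own statement) =====
-- stated objective: alternative
-- what changed: A builds the reversed dict incrementally in one pass, appending each parent with an inline membership test; B never builds incrementally: it first lists the target nodes in order of first appearance (dict.fromkeys) and then computes each target's parent list independently by a full scan over the source keys, so no dedup of parent lists is ever needed (dict keys are unique).
import Mathlib
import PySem

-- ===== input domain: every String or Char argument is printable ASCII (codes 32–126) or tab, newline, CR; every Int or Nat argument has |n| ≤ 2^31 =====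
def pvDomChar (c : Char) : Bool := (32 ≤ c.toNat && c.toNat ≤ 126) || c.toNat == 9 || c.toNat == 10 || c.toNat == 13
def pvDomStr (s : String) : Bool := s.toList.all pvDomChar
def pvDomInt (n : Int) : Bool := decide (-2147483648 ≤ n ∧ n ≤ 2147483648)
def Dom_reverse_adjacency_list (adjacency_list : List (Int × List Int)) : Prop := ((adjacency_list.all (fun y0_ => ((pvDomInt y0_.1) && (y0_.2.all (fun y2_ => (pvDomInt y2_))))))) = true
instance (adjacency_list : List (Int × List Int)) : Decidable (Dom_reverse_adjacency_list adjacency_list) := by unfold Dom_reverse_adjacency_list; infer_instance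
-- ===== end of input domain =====

-- B replaces A's incremental build-with-inline-dedup by a per-target recomputation: list the
-- target nodes in first-appearance order, then compute each target's parents by a fresh full
-- scan over the source keys (no dedup needed since dict keys are unique). Alternative, not faster.

-- ===== PORT A =====
-- the dict parameter is decoded once into a PySem.Dict (insertion order, overwrite keeps position)
def reverse_adjacency_list (adjacency_list : List (Int × List Int)) : List (Int × List Int) :=
  let d := PySem.Dict.ofList adjacency_list
  (d.items.foldl (fun new kv =>
      kv.2.foldl (fun new edge =>
        if new.contains edge then
          if (new.getD edge []).contains kv.1 then new
          else new.modify edge [] (fun l => l ++ [kv.1])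
        else new.insert edge [kv.1]) new)
    PySem.Dict.empty).items

-- ===== PORT B =====
def reverse_adjacency_list_alt (adjacency_list : List (Int × List Int)) : List (Int × List Int) :=
  let d := PySem.Dict.ofList adjacency_list
  -- targets = dict.fromkeys(e for k in adjacency_list for e in adjacency_list[k])
  let targets := PySem.List.dedup (d.items.flatMap (fun kv => kv.2))
  -- {e: [k for k in adjacency_list if e in adjacency_list[k]] for e in targets}
  targets.map (fun e => (e, (d.items.filter (fun kv => kv.2.contains e)).map (fun kv => kv.1)))

-- ===== PRECONDITION & SPEC =====
def Spec_reverse_adjacency_list (adjacency_list : List (Int × List Int)) (out : List (Int × List Int)) : Prop := out = reverse_adjacency_list_alt adjacency_list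
instance (adjacency_list : List (Int × List Int)) (out : List (Int × List Int)) : Decidable (Spec_reverse_adjacency_list adjacency_list out) := by unfold Spec_reverse_adjacency_list; infer_instance

-- ===== CLAIM (what is proved, stated in full; the proofs are below) =====
def Claim_equal_reverse_adjacency_list : Prop := ∀ (adjacency_list : List (Int × List Int)), Dom_reverse_adjacency_list adjacency_list → Spec_reverse_adjacency_list adjacency_list (reverse_adjacency_list adjacency_list)

-- ===== LEMMAS AND PROOFS =====

-- A's inner-loop body, named for the proofs (definitionally the lambda in the port)
def pvStep (k : Int) (new : PySem.Dict Int (List Int)) (edge : Int) : PySem.Dict Int (List Int) :=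
  if new.contains edge then
    if (new.getD edge []).contains k then new
    else new.modify edge [] (fun l => l ++ [k])
  else new.insert edge [k]

-- B's result computed over an item list P (definitionally B's body at P = items of the dict)
def specItems (P : List (Int × List Int)) : List (Int × List Int) :=
  (PySem.List.dedup (P.flatMap (fun kv => kv.2))).map
    (fun e => (e, (P.filter (fun kv => kv.2.contains e)).map (fun kv => kv.1)))

theorem pvOfList_filter (p : Int → Bool) (l : List Int) :
    PySem.Set.ofList (l.filter p) = (PySem.Set.ofList l).filter p := by
  induction l using List.reverseRecOn with
  | nil => rfl
  | append_singleton xs x ih =>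
    rw [List.filter_append, PySem.Set.ofList_append_singleton, PySem.Set.add_eq_ite]
    by_cases hp : p x = true
    · have h1 : [x].filter p = [x] := by simp [hp]
      rw [h1, PySem.Set.ofList_append_singleton, PySem.Set.add_eq_ite, ih]
      by_cases hm : x ∈ PySem.Set.ofList xs
      · rw [if_pos hm, if_pos (by simp [List.mem_filter, hm, hp])]
      · rw [if_neg hm, if_neg (by simp [List.mem_filter, hm]), List.filter_append]
        simp [hp]
    · have h1 : [x].filter p = [] := by simp [hp]
      rw [h1, List.append_nil, ih]
      by_cases hm : x ∈ PySem.Set.ofList xs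
      · rw [if_pos hm]
      · rw [if_neg hm, List.filter_append]
        simp [hp]

theorem pvInner_items (vs : List Int) (k : Int) (D : PySem.Dict Int (List Int))
    (hnd : D.keys.Nodup) :
    (vs.foldl (pvStep k) D).items =
      D.items.map (fun p => if p.1 ∈ vs ∧ k ∉ p.2 then (p.1, p.2 ++ [k]) else p)
      ++ (PySem.Set.ofList (vs.filter (fun e => !(D.contains e)))).map (fun e => (e, [k])) := by
  induction vs generalizing D with
  | nil => simp
  | cons e es ih =>
    simp only [List.foldl_cons]
    by_cases hc : D.contains e = true
    · obtain ⟨v, hv⟩ : ∃ v, D.get? e = some v := by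
        rw [PySem.Dict.contains_eq_isSome_get?] at hc
        exact Option.isSome_iff_exists.mp hc
      have hmem : (e, v) ∈ D.items := PySem.Dict.mem_items_of_get?_eq_some D hv
      have hgd : D.getD e [] = v := PySem.Dict.getD_of_mem_items D hmem hnd []
      have huniq : ∀ p ∈ D.items, p.1 = e → p = (e, v) := by
        intro p hp he
        have h1 : D.get? p.1 = some p.2 := PySem.Dict.get?_of_mem_items D (by simpa using hp) hnd
        rw [he, hv] at h1
        obtain ⟨p1, p2⟩ := p
        simp only at he
        subst he
        simpa using h1.symm
      have hfe : (e :: es).filter (fun x => !(D.contains x)) = es.filter (fun x => !(D.contains x)) := by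
        simp [hc]
      by_cases hk : k ∈ v
      · have hs : pvStep k D e = D := by
          unfold pvStep
          rw [if_pos hc, hgd, if_pos (by simpa [List.contains_eq_mem] using hk)]
        rw [hs, ih D hnd, hfe]
        congr 1
        apply List.map_congr_left
        intro p hp
        by_cases he : p.1 = e
        · rw [huniq p hp he]
          simp [hk]
        · simp [he]
      · have hs : pvStep k D e = D.modify e [] (fun l => l ++ [k]) := by
          unfold pvStep
          rw [if_pos hc, hgd, if_neg (by simpa [List.contains_eq_mem] using hk)]
        have hnd' : (D.modify e [] (fun l => l ++ [k])).keys.Nodup := by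
          unfold PySem.Dict.modify
          exact PySem.Dict.nodup_keys_insert D _ _ hnd
        have hitems : (D.modify e [] (fun l => l ++ [k])).items
            = D.items.map (fun p => if p.1 == e then (e, v ++ [k]) else p) := by
          unfold PySem.Dict.modify
          rw [hgd, PySem.Dict.items_insert_of_contains D _ hc]
        have hcont : ∀ x, (D.modify e [] (fun l => l ++ [k])).contains x = D.contains x := by
          intro x
          rw [PySem.Dict.contains_modify]
          by_cases hx : x = e
          · simp [hx, hc]
          · simp [hx]
        have hfilm : es.filter (fun x => !((D.modify e [] (fun l => l ++ [k])).contains x))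
            = es.filter (fun x => !(D.contains x)) := by
          apply List.filter_congr
          intro x _
          rw [hcont]
        rw [hs, ih _ hnd', hitems, List.map_map, hfe, hfilm]
        congr 1
        apply List.map_congr_left
        intro p hp
        by_cases he : p.1 = e
        · rw [huniq p hp he]
          simp [hk]
        · simp [he]
    · have hc' : D.contains e = false := by simpa using hc
      have hs : pvStep k D e = D.insert e [k] := by
        unfold pvStep
        rw [if_neg (by simp [hc'])]
      have hnd' : (D.insert e [k]).keys.Nodup := PySem.Dict.nodup_keys_insert D _ _ hnd
      have hitems : (D.insert e [k]).items = D.items ++ [(e, [k])] :=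
        PySem.Dict.items_insert_of_not_contains D _ hc'
      have hcont : ∀ x, (D.insert e [k]).contains x = ((x == e) || D.contains x) := by
        intro x
        have hmod : D.insert e [k] = D.modify e [] (fun _ => [k]) := by
          unfold PySem.Dict.modify
          rfl
        rw [hmod, PySem.Dict.contains_modify]
      have hnokey : ∀ p ∈ D.items, p.1 ≠ e := by
        intro p hp he
        have hct : D.contains p.1 = true := by
          rw [PySem.Dict.contains_eq_decide_mem_keys]
          simp [PySem.Dict.mem_keys_of_mem_items D hp]
        rw [he, hc'] at hct
        exact Bool.noConfusion hct
      rw [hs, ih _ hnd', hitems, List.map_append]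
      have hsing : ([(e, [k])].map (fun p => if p.1 ∈ es ∧ k ∉ p.2 then (p.1, p.2 ++ [k]) else p)) = [(e, [k])] := by
        simp
      rw [hsing]
      have hmap : D.items.map (fun p => if p.1 ∈ es ∧ k ∉ p.2 then (p.1, p.2 ++ [k]) else p)
          = D.items.map (fun p => if p.1 ∈ e :: es ∧ k ∉ p.2 then (p.1, p.2 ++ [k]) else p) := by
        apply List.map_congr_left
        intro p hp
        simp [hnokey p hp]
      have hfil : es.filter (fun x => !((D.insert e [k]).contains x))
          = (es.filter (fun x => !(D.contains x))).filter (fun x => !(x == e)) := by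
        rw [List.filter_filter]
        apply List.filter_congr
        intro x _
        rw [hcont x]
        cases hxe : (x == e) <;> simp
      rw [hmap, hfil, pvOfList_filter]
      have hrhs : (e :: es).filter (fun x => !(D.contains x)) = e :: es.filter (fun x => !(D.contains x)) := by
        simp [hc']
      rw [hrhs, PySem.Set.ofList_cons]
      simp [PySem.Set.discard, List.append_assoc]

theorem pvParents_sub (P : List (Int × List Int)) (e : Int) :
    ∀ x ∈ (P.filter (fun q => q.2.contains e)).map (fun q => q.1), x ∈ P.map (fun q => q.1) := by
  intro x hx
  obtain ⟨q, hq, rfl⟩ := List.mem_map.mp hx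
  exact List.mem_map_of_mem (List.mem_of_mem_filter hq)

theorem pvSpec_snoc (P : List (Int × List Int)) (kv : Int × List Int)
    (hk : kv.1 ∉ P.map (fun q => q.1)) :
    specItems (P ++ [kv]) =
      (specItems P).map (fun p => if p.1 ∈ kv.2 ∧ kv.1 ∉ p.2 then (p.1, p.2 ++ [kv.1]) else p)
      ++ (PySem.Set.ofList (kv.2.filter (fun x => !(decide (x ∈ P.flatMap (fun q => q.2)))))).map
          (fun e => (e, [kv.1])) := by
  unfold specItems
  rw [List.flatMap_append]
  have hflat : [kv].flatMap (fun q => q.2) = kv.2 := by simp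
  rw [hflat, PySem.List.dedup_eq_ofList, PySem.List.dedup_eq_ofList, PySem.Set.ofList_append,
      PySem.Set.update_eq_append_filter, List.map_append, List.map_map]
  congr 1
  · apply List.map_congr_left
    intro e he
    have hkp : kv.1 ∉ (P.filter (fun q => q.2.contains e)).map (fun q => q.1) :=
      fun hx => hk (pvParents_sub P e _ hx)
    simp only [Function.comp_apply]
    rw [List.filter_append]
    by_cases hce : e ∈ kv.2
    · rw [if_pos ⟨hce, hkp⟩]
      have hone : [kv].filter (fun q => q.2.contains e) = [kv] := by
        simp [List.contains_eq_mem, hce]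
      rw [hone, List.map_append]
      rfl
    · rw [if_neg (fun hcond => hce hcond.1)]
      have hone : [kv].filter (fun q => q.2.contains e) = [] := by
        simp [List.contains_eq_mem, hce]
      rw [hone, List.append_nil]
  · have hpred : kv.2.filter (fun x => !(decide (x ∈ P.flatMap (fun q => q.2))))
        = kv.2.filter (fun y => !((PySem.Set.ofList (P.flatMap (fun q => q.2))).contains y)) := by
      apply List.filter_congr
      intro x _
      simp [PySem.Set.contains, List.contains_eq_mem, PySem.Set.mem_ofList]
    rw [hpred, pvOfList_filter]
    apply List.map_congr_left
    intro e he
    have he' := List.mem_filter.mp he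
    have he2 : e ∈ kv.2 := by
      have := he'.1
      simpa [PySem.Set.mem_ofList] using this
    have heF : e ∉ P.flatMap (fun q => q.2) := by
      have := he'.2
      simpa [PySem.Set.contains, List.contains_eq_mem, PySem.Set.mem_ofList] using this
    rw [List.filter_append]
    have hP : P.filter (fun q => q.2.contains e) = [] := by
      rw [List.filter_eq_nil_iff]
      intro q hq hqc
      exact heF (List.mem_flatMap.mpr ⟨q, hq, by simpa [List.contains_eq_mem] using hqc⟩)
    have hone : [kv].filter (fun q => q.2.contains e) = [kv] := by
      simp [List.contains_eq_mem, he2]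
    rw [hP, hone]
    rfl

theorem pvOuterStep (P : List (Int × List Int)) (kv : Int × List Int)
    (hk : kv.1 ∉ P.map (fun q => q.1)) :
    kv.2.foldl (pvStep kv.1) (PySem.Dict.mk (specItems P))
      = PySem.Dict.mk (specItems (P ++ [kv])) := by
  apply PySem.Dict.ext
  have hkeys : (PySem.Dict.mk (specItems P)).keys = PySem.List.dedup (P.flatMap (fun q => q.2)) := by
    simp only [PySem.Dict.keys, specItems, List.map_map]
    simp [Function.comp_def]
  have hnd : (PySem.Dict.mk (specItems P)).keys.Nodup := by
    rw [hkeys]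
    exact PySem.List.nodup_dedup _
  rw [pvInner_items kv.2 kv.1 _ hnd]
  have hcont : kv.2.filter (fun e => !((PySem.Dict.mk (specItems P)).contains e))
      = kv.2.filter (fun x => !(decide (x ∈ P.flatMap (fun q => q.2)))) := by
    apply List.filter_congr
    intro x _
    rw [PySem.Dict.contains_eq_decide_mem_keys, hkeys]
    simp
  have hitems : (PySem.Dict.mk (specItems P)).items = specItems P := rfl
  rw [hitems, hcont, pvSpec_snoc P kv hk]

theorem pvOuterAux (suffix P : List (Int × List Int))
    (h : ((P ++ suffix).map (fun q => q.1)).Nodup) :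
    suffix.foldl (fun new kv => kv.2.foldl (pvStep kv.1) new) (PySem.Dict.mk (specItems P))
      = PySem.Dict.mk (specItems (P ++ suffix)) := by
  induction suffix generalizing P with
  | nil => simp
  | cons kv rest ih =>
    have hk : kv.1 ∉ P.map (fun q => q.1) := by
      rw [List.map_append, List.nodup_append] at h
      intro hmem
      exact h.2.2 kv.1 hmem kv.1 (by simp) rfl
    simp only [List.foldl_cons]
    rw [pvOuterStep P kv hk]
    have h' : (((P ++ [kv]) ++ rest).map (fun q => q.1)).Nodup := by
      simpa [List.append_assoc] using h
    rw [ih (P ++ [kv]) h', List.append_assoc]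
    rfl

-- ===== VERDICT (by name: the statement is the Claim_ definition above) =====
theorem reverse_adjacency_list_spec : Claim_equal_reverse_adjacency_list := by
  intro al _
  unfold Spec_reverse_adjacency_list
  have hnd : (([] ++ (PySem.Dict.ofList al).items).map (fun q : Int × List Int => q.1)).Nodup := by
    simp only [List.nil_append]
    have h := PySem.Dict.nodup_keys_ofList al
    simpa [PySem.Dict.keys] using h
  show (( (PySem.Dict.ofList al).items.foldl (fun new kv => kv.2.foldl (pvStep kv.1) new)
      (PySem.Dict.mk (specItems []))).items) = specItems (PySem.Dict.ofList al).items
  rw [pvOuterAux (PySem.Dict.ofList al).items [] hnd]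
  rfl
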